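-- pv_equiv track=rewrite | github.com/khelwood/advent-of-code | 2022/d06_tuning.py | find_packet_start
-- ===== SOURCE A (Python) =====
-- from collections import Counter
--
-- def find_packet_start(data, target=4):
--     c = Counter(data[:target])
--     count = len(c)
--     if count==target:
--         return target
--     for i in range(target, len(data)):
--         old = data[i-target]
--         new = data[i]
--         v = c[old]
--         if v==1:
--             count -= 1
--         c[old] = v-1
--         v = c[new]
--         if v==0:
--             count += 1
--         c[new] = v+1
--         if count==target:
--             return i+1
--     return -1
-- ===== SOURCE B (Python) =====
-- def find_packet_start(data, target=4):
--     for j in range(target, len(data) + 1):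
--         if len(set(data[j - target:j])) == target:
--             return j
--     return -1
-- ===== Notes on version B (the rewrite author's own statement) =====
-- stated objective: simpler
-- what changed: Replaces the incremental sliding-window Counter bookkeeping with a plain scan that recomputes each window's distinct-character count via set(); no running counter or distinct-count accumulator is maintained.
import Mathlib
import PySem

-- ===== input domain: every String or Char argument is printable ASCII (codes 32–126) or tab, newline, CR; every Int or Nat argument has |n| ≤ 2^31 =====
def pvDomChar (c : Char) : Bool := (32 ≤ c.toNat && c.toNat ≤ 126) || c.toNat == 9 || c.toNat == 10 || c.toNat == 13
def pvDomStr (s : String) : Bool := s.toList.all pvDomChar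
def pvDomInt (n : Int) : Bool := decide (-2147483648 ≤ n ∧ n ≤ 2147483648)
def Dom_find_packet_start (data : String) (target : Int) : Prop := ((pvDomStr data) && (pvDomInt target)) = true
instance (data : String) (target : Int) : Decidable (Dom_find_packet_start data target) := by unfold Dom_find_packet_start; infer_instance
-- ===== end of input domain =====

-- B drops A's incremental sliding-window Counter bookkeeping and instead recomputes each
-- window's distinct-character count from scratch (objective: simpler).

-- ===== PORT A =====
-- the 'for i in range(target, len(data))' loop; the '| _, _' arm is where Python raises
-- IndexError (excluded by Pre_)
def pvAloop (l : List Char) (target : Int) : List Int → PySem.Dict Char Int → Int → Int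
  | [], _, _ => -1
  | i :: rest, c, count =>
    match PySem.List.pyGet? l (i - target), PySem.List.pyGet? l i with
    | some old, some new =>
        let v := c.getD old 0
        let count1 := if v == 1 then count - 1 else count
        let c1 := c.insert old (v - 1)
        let v2 := c1.getD new 0
        let count2 := if v2 == 0 then count1 + 1 else count1
        let c2 := c1.insert new (v2 + 1)
        if count2 == target then i + 1 else pvAloop l target rest c2 count2
    | _, _ => -1

def find_packet_start (data : String) (target : Int) : Int :=
  let l := data.toList
  let c := PySem.Dict.counter (PySem.List.slice l none (some target))
  let count : Int := (PySem.Dict.size c : Int)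
  if count == target then target
  else pvAloop l target (PySem.List.pyRange target (l.length : Int) 1) c count

-- ===== PORT B =====
-- the 'for j in range(target, len(data)+1)' loop of Source B
def pvBloop (l : List Char) (target : Int) : List Int → Int
  | [] => -1
  | j :: rest =>
    if ((PySem.Set.ofList (PySem.List.slice l (some (j - target)) (some j))).length : Int) == target
    then j else pvBloop l target rest

def find_packet_start_alt (data : String) (target : Int) : Int :=
  let l := data.toList
  pvBloop l target (PySem.List.pyRange target ((l.length : Int) + 1) 1)

-- ===== PRECONDITION & SPEC =====
-- Pre_ excludes target < 0, on which A raises IndexError (its sliding indices run past the string).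
def Pre_find_packet_start (data : String) (target : Int) : Prop := 0 ≤ target
instance (data : String) (target : Int) : Decidable (Pre_find_packet_start data target) := by unfold Pre_find_packet_start; infer_instance
def pvWitness_find_packet_start : String × Int := ("mjqjpqmgbljsphdztnvjfqwrcgsmlb", 4)

def Spec_find_packet_start (data : String) (target : Int) (out : Int) : Prop := out = find_packet_start_alt data target
instance (data : String) (target : Int) (out : Int) : Decidable (Spec_find_packet_start data target out) := by unfold Spec_find_packet_start; infer_instance

-- ===== CLAIM (what is proved, stated in full; the proofs are below) =====
def Claim_equal_find_packet_start : Prop := ∀ (data : String) (target : Int), Dom_find_packet_start data target → Pre_find_packet_start data target → Spec_find_packet_start data target (find_packet_start data target)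

-- ===== LEMMAS AND PROOFS =====

-- the window of length T ending at position j (for T ≤ j ≤ l.length)
def pvWin (l : List Char) (T j : Nat) : List Char := (l.drop (j - T)).take T

-- distinct-element count of a window, as B computes it
def pvDc (w : List Char) : Nat := (PySem.Set.ofList w).length

theorem pvDc_eq_card (w : List Char) : pvDc w = w.toFinset.card := by
  have hnd : (PySem.Set.ofList w).Nodup := PySem.Set.nodup_ofList w
  have : (PySem.Set.ofList w).toFinset = w.toFinset := by
    ext x; simp [PySem.Set.mem_ofList]
  calc pvDc w = (PySem.Set.ofList w).toFinset.card := (List.toFinset_card_of_nodup hnd).symm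
    _ = w.toFinset.card := by rw [this]

theorem pvDc_le_length (w : List Char) : pvDc w ≤ w.length := by
  rw [pvDc_eq_card]; exact w.toFinset_card_le

theorem pvDc_cons (a : Char) (m : List Char) :
    (pvDc (a :: m) : Int) = pvDc m + (if a ∈ m then 0 else 1) := by
  rw [pvDc_eq_card, pvDc_eq_card, List.toFinset_cons]
  by_cases h : a ∈ m
  · simp [h, Finset.insert_eq_self.2 (List.mem_toFinset.2 h)]
  · rw [Finset.card_insert_of_notMem (by simpa using h)]
    simp [h]

theorem pvDc_append_singleton (m : List Char) (b : Char) :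
    (pvDc (m ++ [b]) : Int) = pvDc m + (if b ∈ m then 0 else 1) := by
  rw [pvDc_eq_card, pvDc_eq_card, List.toFinset_append]
  rw [show m.toFinset ∪ [b].toFinset = insert b m.toFinset by
    ext x; simp [or_comm]]
  by_cases h : b ∈ m
  · simp [h, Finset.insert_eq_self.2 (List.mem_toFinset.2 h)]
  · rw [Finset.card_insert_of_notMem (by simpa using h)]
    simp [h]

-- slice l [j-T : j] is the window pvWin l T j
theorem pvSlice_eq_win (l : List Char) (T j : Nat) (hTj : T ≤ j) :
    PySem.List.slice l (some ((j : Int) - (T : Int))) (some (j : Int)) = pvWin l T j := by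
  have h1 : (j : Int) - (T : Int) = ((j - T : Nat) : Int) := by omega
  rw [h1, PySem.List.slice_natCast, pvWin]
  congr 1
  omega

-- decomposition of consecutive windows: pvWin i = a :: m, pvWin (i+1) = m ++ [b]
theorem pvWin_decomp (l : List Char) (T i : Nat) (hT : 1 ≤ T) (hTi : T ≤ i)
    (hin : i < l.length) :
    ∃ m, pvWin l T i = l[i - T]'(by omega) :: m ∧ pvWin l T (i + 1) = m ++ [l[i]'hin] := by
  obtain ⟨S, rfl⟩ : ∃ S, T = S + 1 := ⟨T - 1, by omega⟩
  refine ⟨(l.drop (i - (S + 1) + 1)).take S, ?_, ?_⟩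
  · rw [pvWin, List.drop_eq_getElem_cons (by omega), List.take_succ_cons]
  · rw [pvWin, show i + 1 - (S + 1) = i - (S + 1) + 1 by omega, List.take_add_one]
    congr 1
    rw [List.getElem?_drop]
    rw [show i - (S + 1) + 1 + S = i by omega, List.getElem?_eq_getElem hin]
    rfl

-- one Counter-update step of A's loop: reading/writing the counter of window a :: m
-- yields the counter of the next window m ++ [b], and the two values read are the
-- multiplicities A's count bookkeeping branches on
theorem pvCount_step (a b : Char) (m : List Char) (c : PySem.Dict Char Int)
    (hc : ∀ ch, c.getD ch 0 = ((a :: m).count ch : Int)) :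
    c.getD a 0 = (m.count a : Int) + 1 ∧
    (c.insert a (c.getD a 0 - 1)).getD b 0 = (m.count b : Int) ∧
    (∀ ch, ((c.insert a (c.getD a 0 - 1)).insert b
        ((c.insert a (c.getD a 0 - 1)).getD b 0 + 1)).getD ch 0
      = ((m ++ [b]).count ch : Int)) := by
  have ha : c.getD a 0 = (m.count a : Int) + 1 := by
    rw [hc a, List.count_cons_self]; push_cast; ring
  have hv2 : (c.insert a (c.getD a 0 - 1)).getD b 0 = (m.count b : Int) := by
    rw [PySem.Dict.getD_insert]
    by_cases hba : b = a
    · rw [if_pos hba, ha, hba]; ring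
    · rw [if_neg hba, hc b, List.count_cons_of_ne (fun h => hba h.symm)]
  refine ⟨ha, hv2, ?_⟩
  intro ch
  rw [PySem.Dict.getD_insert]
  by_cases hchb : ch = b
  · subst hchb
    rw [if_pos rfl, hv2, List.count_append, List.count_singleton]
    simp
  · rw [if_neg hchb, PySem.Dict.getD_insert]
    have hcnt : (m ++ [b]).count ch = m.count ch := by
      rw [List.count_append, List.count_singleton]
      simp [Ne.symm hchb]
    rw [hcnt]
    by_cases hcha : ch = a
    · subst hcha; rw [if_pos rfl, ha]; ring
    · rw [if_neg hcha, hc ch, List.count_cons_of_ne (fun h => hcha h.symm)]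

-- the central loop equivalence: A's remaining loop from index i agrees with B's
-- remaining scan from window-end i+1, given the two invariants
theorem pvLoop_eq (l : List Char) (T : Nat) (hT : 1 ≤ T) :
    ∀ (k i : Nat), i + k = l.length → T ≤ i →
    ∀ (c : PySem.Dict Char Int) (count : Int),
    (∀ ch, c.getD ch 0 = ((pvWin l T i).count ch : Int)) →
    count = (pvDc (pvWin l T i) : Int) →
    pvAloop l (T : Int) (PySem.List.pyRange (i : Int) (l.length : Int) 1) c count
      = pvBloop l (T : Int) (PySem.List.pyRange ((i : Int) + 1) ((l.length : Int) + 1) 1) := by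
  intro k
  induction k with
  | zero =>
    intro i hik hTi c count hc hcount
    rw [PySem.List.pyRange_one_eq_nil (by omega), PySem.List.pyRange_one_eq_nil (by omega)]
    rfl
  | succ k ih =>
    intro i hik hTi c count hc hcount
    have hin : i < l.length := by omega
    obtain ⟨m, hw, hw'⟩ := pvWin_decomp l T i hT hTi hin
    set a := l[i - T]'(by omega) with hadef
    set b := l[i]'hin with hbdef
    have hrA : PySem.List.pyRange (i : Int) (l.length : Int) 1
        = (i : Int) :: PySem.List.pyRange ((i : Int) + 1) (l.length : Int) 1 :=
      PySem.List.pyRange_one_cons (by exact_mod_cast hin)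
    have hrB : PySem.List.pyRange ((i : Int) + 1) ((l.length : Int) + 1) 1
        = ((i : Int) + 1) :: PySem.List.pyRange ((i : Int) + 1 + 1) ((l.length : Int) + 1) 1 :=
      PySem.List.pyRange_one_cons (by push_cast; omega)
    rw [hrA, hrB]
    have hgo : PySem.List.pyGet? l ((i : Int) - (T : Int)) = some a := by
      rw [show (i : Int) - (T : Int) = ((i - T : Nat) : Int) by omega, PySem.List.pyGet?_natCast]
      rw [List.getElem?_eq_getElem (show i - T < l.length by omega)]
    have hgn : PySem.List.pyGet? l (i : Int) = some b := by
      rw [PySem.List.pyGet?_natCast, List.getElem?_eq_getElem hin]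
    have hc' : ∀ ch, c.getD ch 0 = ((a :: m).count ch : Int) := by
      intro ch; rw [hc ch, hw]
    obtain ⟨ha, hv2, hc2⟩ := pvCount_step a b m c hc'
    rw [ha] at hv2
    rw [ha] at hc2
    rw [pvAloop, hgo, hgn]
    simp only [ha, hv2]
    have hnotm_a : ((m.count a : Int) + 1 == (1 : Int)) = decide (a ∉ m) := by
      by_cases h : a ∈ m
      · have := List.count_pos_iff.2 h
        simp [h]; omega
      · simp [h, List.count_eq_zero.2 h]
    have hnotm_b : ((m.count b : Int) == (0 : Int)) = decide (b ∉ m) := by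
      by_cases h : b ∈ m
      · have := List.count_pos_iff.2 h
        simp [h]; omega
      · simp [h, List.count_eq_zero.2 h]
    have hcount2 :
        (if ((m.count b : Int) == (0 : Int)) = true then
            (if ((m.count a : Int) + 1 == (1 : Int)) = true then count - 1 else count) + 1
          else
            (if ((m.count a : Int) + 1 == (1 : Int)) = true then count - 1 else count))
          = (pvDc (pvWin l T (i + 1)) : Int) := by
      rw [hcount, hw, hw', hnotm_a, hnotm_b, pvDc_cons, pvDc_append_singleton]
      by_cases h1 : a ∈ m <;> by_cases h2 : b ∈ m <;> simp [h1, h2] <;> omega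
    rw [hcount2]
    simp only [pvBloop]
    rw [show (i : Int) + 1 = ((i + 1 : Nat) : Int) by push_cast; omega,
      pvSlice_eq_win l T (i + 1) (by omega)]
    by_cases hhit : (pvDc (pvWin l T (i + 1)) : Int) = (T : Int)
    · rw [if_pos (by simpa using hhit), if_pos (by simpa [pvDc] using hhit)]
    · rw [if_neg (by simpa using hhit), if_neg (by simpa [pvDc] using hhit)]
      have hnext : ∀ ch, ((c.insert a ((m.count a : Int) + 1 - 1)).insert b
          ((m.count b : Int) + 1)).getD ch 0 = ((pvWin l T (i + 1)).count ch : Int) := by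
        intro ch
        have := hc2 ch
        rw [hv2] at this
        rw [this, hw']
      have := ih (i + 1) (by omega) (by omega) _ _ hnext rfl
      rw [show ((i + 1 : Nat) : Int) = (i : Int) + 1 by push_cast; omega] at this
      exact this

-- A's initial Counter satisfies the loop invariants for the first window
theorem pvInit (l : List Char) (T : Nat) :
    (∀ ch, (PySem.Dict.counter (l.take T)).getD ch 0 = ((pvWin l T T).count ch : Int)) ∧
      ((PySem.Dict.size (PySem.Dict.counter (l.take T)) : Int) = (pvDc (pvWin l T T) : Int)) := by
  have hwin : pvWin l T T = l.take T := by simp [pvWin]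
  constructor
  · intro ch; rw [hwin, PySem.Dict.getD_counter]
  · rw [hwin]
    have : PySem.Dict.size (PySem.Dict.counter (l.take T))
        = (PySem.Dict.counter (l.take T)).keys.length := by
      simp [PySem.Dict.size, PySem.Dict.keys]
    rw [this, PySem.Dict.keys_counter]
    rfl

-- ===== VERDICT (by name: the statement is the Claim_ definition above) =====
theorem find_packet_start_spec : Claim_equal_find_packet_start := by
  intro data target _ hpre
  unfold Spec_find_packet_start find_packet_start find_packet_start_alt
  simp only []
  set l := data.toList with hl
  obtain ⟨T, rfl⟩ : ∃ T : Nat, target = (T : Int) :=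
    ⟨target.toNat, by unfold Pre_find_packet_start at hpre; omega⟩
  have hslice : PySem.List.slice l none (some (T : Int)) = l.take T :=
    PySem.List.slice_to_natCast l T
  obtain ⟨hc0, hcount0⟩ := pvInit l T
  by_cases hTn : T ≤ l.length
  · -- first window exists: B's first probe is exactly A's pre-loop check
    have hrB : PySem.List.pyRange (T : Int) ((l.length : Int) + 1) 1
        = (T : Int) :: PySem.List.pyRange ((T : Int) + 1) ((l.length : Int) + 1) 1 :=
      PySem.List.pyRange_one_cons (by push_cast; omega)
    rw [hrB]
    simp only [pvBloop]
    rw [pvSlice_eq_win l T T (le_refl T), hslice]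
    by_cases hhit : ((PySem.Dict.size (PySem.Dict.counter (l.take T)) : Int)) = (T : Int)
    · have hd : (pvDc (pvWin l T T) : Int) = (T : Int) := by rw [← hcount0]; exact hhit
      rw [if_pos (by simpa using hhit)]
      rw [if_pos (by simpa [pvDc] using hd)]
    · have hd : ¬ (pvDc (pvWin l T T) : Int) = (T : Int) := by rw [← hcount0]; exact hhit
      rw [if_neg (by simpa using hhit)]
      rw [if_neg (by simpa [pvDc] using hd)]
      rcases Nat.eq_zero_or_pos T with hT0 | hT1
      · -- T = 0: the pre-loop check always succeeds, contradiction
        exfalso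
        apply hhit
        rw [hcount0, hT0]
        simp [pvWin, pvDc, PySem.Set.ofList]
      · exact pvLoop_eq l T hT1 (l.length - T) T (by omega) (le_refl T) _ _ hc0 hcount0
  · -- data shorter than target: both loops are empty and the pre-loop check fails
    have hfail : ¬ ((PySem.Dict.size (PySem.Dict.counter (l.take T)) : Int) = (T : Int)) := by
      rw [hcount0]
      have h1 : pvDc (pvWin l T T) ≤ (pvWin l T T).length := pvDc_le_length _
      have h2 : (pvWin l T T).length ≤ l.length := by
        simp only [pvWin, List.length_take, List.length_drop]
        omega
      intro h
      omega
    rw [if_neg (by simpa using hfail),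
      PySem.List.pyRange_one_eq_nil (by push_cast; omega),
      PySem.List.pyRange_one_eq_nil (by push_cast; omega)]
    rfl
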